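-- pv_equiv track=rewrite | github.com/travisCxy/deblur | att_model_2.2/projects/hw/common.py | code2attvec
-- ===== SOURCE A (Python) =====
-- MAX_SEQ_LEN = 50
--
-- GO_SYMBOL = 1
--
-- END_SYMBOL = 2
--
-- PAD_SYMBOL = 0
--
-- _code_map = {}
--
-- def code2vec(s, code_map=_code_map):
--     vec = []
--     s = s.replace('$', '')
--     s = s.replace('`dot', '`')
--     s = s.replace(u'……', u'…')
--     s = s.replace(u'＋', u'+')
--     s = s.replace(u'－', u'-')
--     s = s.replace(u'＝', u'=')
--     s = s.replace(u'：', u':')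
--     for c in s:
--         if c in code_map:
--             n = code_map[c]
--             vec.append(n)
--     if len(vec) >= MAX_SEQ_LEN:
--         raise Exception("exceed MAX_SEQ_LEN")
--     vec.extend([-1] * (MAX_SEQ_LEN - len(vec)))
--     return vec
--
-- def code2attvec(s, code_map=_code_map):
--     vec = code2vec(s, code_map)
--     ret = [GO_SYMBOL]
--     for v in vec:
--         if v != -1:
--             ret.append(v + 3)
--         else:
--             break
--     ret.append(END_SYMBOL)
--     if len(ret) >= MAX_SEQ_LEN:
--         raise Exception("exceed MAX_SEQ_LEN")
--     ret.extend([PAD_SYMBOL] * (MAX_SEQ_LEN - len(ret)))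
--     return ret
-- ===== SOURCE B (Python) =====
-- MAX_SEQ_LEN = 50
--
-- GO_SYMBOL = 1
--
-- END_SYMBOL = 2
--
-- PAD_SYMBOL = 0
--
-- _code_map = {}
--
-- def code2attvec(s, code_map=_code_map):
--     s = s.replace('$', '')
--     s = s.replace('`dot', '`')
--     s = s.replace(u'……', u'…')
--     s = s.replace(u'＋', u'+')
--     s = s.replace(u'－', u'-')
--     s = s.replace(u'＝', u'=')
--     s = s.replace(u'：', u':')
--     ret = [GO_SYMBOL] + [code_map[c] + 3 for c in s if c in code_map] + [END_SYMBOL]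
--     if len(ret) >= MAX_SEQ_LEN:
--         raise Exception("exceed MAX_SEQ_LEN")
--     return ret + [PAD_SYMBOL] * (MAX_SEQ_LEN - len(ret))
-- ===== Notes on version B (the rewrite author's own statement) =====
-- stated objective: simpler
-- what changed: B inlines the encoding into one pass: it builds the mapped codes directly with a filtered comprehension (+3 applied immediately) and assembles [GO]+codes+[END] with a single length check and a single padding step, eliminating code2vec's intermediate -1 sentinel padding and the break loop that re-scans it.
import Mathlib
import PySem

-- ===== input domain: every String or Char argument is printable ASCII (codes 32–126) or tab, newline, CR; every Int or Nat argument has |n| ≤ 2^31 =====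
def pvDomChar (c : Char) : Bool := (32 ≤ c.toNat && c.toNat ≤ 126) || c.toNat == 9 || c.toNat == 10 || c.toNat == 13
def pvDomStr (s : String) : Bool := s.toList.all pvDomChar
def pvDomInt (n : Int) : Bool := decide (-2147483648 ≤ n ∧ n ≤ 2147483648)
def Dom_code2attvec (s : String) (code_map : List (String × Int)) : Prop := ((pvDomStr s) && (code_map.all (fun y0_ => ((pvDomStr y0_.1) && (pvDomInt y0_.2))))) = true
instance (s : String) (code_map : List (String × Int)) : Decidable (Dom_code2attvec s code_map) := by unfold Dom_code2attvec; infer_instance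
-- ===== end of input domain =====

-- B inlines A's two-phase sentinel-padding/break pipeline into one filtered map with a single
-- length check (objective: simpler); equivalence is about the return value only.

-- ===== PORT A =====
-- the replacement chain applied to s at the top of code2vec (shared normalisation of the input;
-- B performs the identical chain)
def pvNormalize (s : String) : String :=
  let s := PySem.Str.replace s "$" ""
  let s := PySem.Str.replace s "`dot" "`"
  let s := PySem.Str.replace s "……" "…"
  let s := PySem.Str.replace s "＋" "+"
  let s := PySem.Str.replace s "－" "-"
  let s := PySem.Str.replace s "＝" "="
  let s := PySem.Str.replace s "：" ":"
  s

-- the 'for c in s: if c in code_map: vec.append(code_map[c])' loop of code2vec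
def pvVecLoop (d : PySem.Dict String Int) : List Char → List Int → List Int
  | [], vec => vec
  | c :: cs, vec =>
    match d.get? (String.mk [c]) with
    | some n => pvVecLoop d cs (vec ++ [n])
    | none => pvVecLoop d cs vec

-- code2vec; on inputs where Python raises "exceed MAX_SEQ_LEN" (excluded by Pre_) it returns []
def code2vec (s : String) (code_map : List (String × Int)) : List Int :=
  let t := pvNormalize s
  let vec := pvVecLoop (PySem.Dict.ofList code_map) t.toList []
  if 50 ≤ vec.length then [] else vec ++ List.replicate (50 - vec.length) (-1)

-- the 'for v in vec: if v != -1: ret.append(v + 3) else: break' loop of code2attvec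
def pvAttLoop : List Int → List Int → List Int
  | ret, [] => ret
  | ret, v :: rest => if v ≠ -1 then pvAttLoop (ret ++ [v + 3]) rest else ret

def code2attvec (s : String) (code_map : List (String × Int)) : List Int :=
  let vec := code2vec s code_map
  let ret := pvAttLoop [1] vec
  let ret := ret ++ [2]
  if 50 ≤ ret.length then [] else ret ++ List.replicate (50 - ret.length) 0

-- ===== PORT B =====
def code2attvec_alt (s : String) (code_map : List (String × Int)) : List Int :=
  let t := pvNormalize s
  let ret := 1 :: (t.toList.filterMap
      (fun c => ((PySem.Dict.ofList code_map).get? (String.mk [c])).map (· + 3))) ++ [2]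
  if 50 ≤ ret.length then [] else ret ++ List.replicate (50 - ret.length) 0

-- ===== PRECONDITION & SPEC =====
-- Pre_ reads the string through the two replacements that can act on the ASCII domain Dom
-- ('$' never survives; the five non-ASCII replacements are no-ops there, proved below):
-- pvNorm2 is the '`dot' → '`' rewrite written directly on the character list.
def pvNorm2 : List Char → List Char
  | [] => []
  | '`' :: 'd' :: 'o' :: 't' :: t => '`' :: pvNorm2 t
  | c :: t => c :: pvNorm2 t

-- Pre_ excludes (i) inputs whose normalised string has 48 or more code_map-mapped characters,
-- on which A (and B) raise "exceed MAX_SEQ_LEN", and (ii) inputs with a code_map entry of the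
-- reserved padding-sentinel value -1 reachable from s, a corner that violates the encoding's
-- implicit invariant (codes shifted by +3 to stay above GO/END/PAD): there A's break loop
-- silently truncates the vector at the sentinel while B encodes the -1 as 2, and neither value
-- is a specified encoding.
def Pre_code2attvec (s : String) (code_map : List (String × Int)) : Prop :=
  ((pvNorm2 (s.toList.filter (fun c => c != '$'))).filter
      (fun c => code_map.any (fun p => p.1.toList == [c]))).length ≤ 47
  ∧ (s.toList.all (fun c => c == '$'
      || !((code_map.reverse.find? (fun p => p.1.toList == [c])).map (fun p => p.2) == some (-1)))) = true
instance (s : String) (code_map : List (String × Int)) : Decidable (Pre_code2attvec s code_map) := by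
  unfold Pre_code2attvec; infer_instance

def pvWitness_code2attvec : String × (List (String × Int)) := ("ab", [("a", 5)])

def Spec_code2attvec (s : String) (code_map : List (String × Int)) (out : List Int) : Prop :=
  out = code2attvec_alt s code_map
instance (s : String) (code_map : List (String × Int)) (out : List Int) : Decidable (Spec_code2attvec s code_map out) := by
  unfold Spec_code2attvec; infer_instance

-- ===== CLAIM (what is proved, stated in full; the proofs are below) =====
def Claim_equal_code2attvec : Prop := ∀ (s : String) (code_map : List (String × Int)), Dom_code2attvec s code_map → Pre_code2attvec s code_map → Spec_code2attvec s code_map (code2attvec s code_map)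

-- ===== LEMMAS AND PROOFS =====
-- proof-side abbreviation: the mapped codes of the normalised string
def pvCodes (s : String) (code_map : List (String × Int)) : List Int :=
  (pvNormalize s).toList.filterMap (fun c => (PySem.Dict.ofList code_map).get? (String.mk [c]))

-- unfolding equations and properties of PySem.Chars.replace, to connect Pre_'s two-step
-- char-level normalisation with the ports' full replacement chain on the ASCII domain
theorem go_eq_zero (old new : List Char) (l acc : List Char) :
    PySem.Chars.replace.go old new 0 l acc = acc.reverse ++ l := by
  simp [PySem.Chars.replace.go]

theorem go_eq_nil (old new : List Char) (fuel : Nat) (acc : List Char) :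
    PySem.Chars.replace.go old new (fuel + 1) [] acc = acc.reverse := by
  simp [PySem.Chars.replace.go]

theorem go_eq_cons (old new : List Char) (fuel : Nat) (c : Char) (t acc : List Char) :
    PySem.Chars.replace.go old new (fuel + 1) (c :: t) acc
      = if old.isPrefixOf (c :: t) then
          PySem.Chars.replace.go old new fuel (List.drop old.length (c :: t)) (new.reverse ++ acc)
        else PySem.Chars.replace.go old new fuel t (c :: acc) := by
  rw [PySem.Chars.replace.go]

theorem go_subset (old new : List Char) (hsub : ∀ a ∈ new, a ∈ old) :
    ∀ (fuel : Nat) (l acc : List Char) (a : Char),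
      a ∈ PySem.Chars.replace.go old new fuel l acc → a ∈ l ∨ a ∈ acc := by
  intro fuel
  induction fuel with
  | zero =>
    intro l acc a h
    rw [go_eq_zero] at h
    simp at h
    tauto
  | succ n ih =>
    intro l acc a h
    cases l with
    | nil =>
      rw [go_eq_nil] at h
      simp at h
      right; exact h
    | cons c t =>
      rw [go_eq_cons] at h
      by_cases hp : old.isPrefixOf (c :: t)
      · rw [if_pos hp] at h
        rcases ih _ _ _ h with h1 | h2
        · exact Or.inl (List.drop_subset _ _ h1)
        · simp at h2
          rcases h2 with h2 | h2
          · exact Or.inl ((List.isPrefixOf_iff_prefix.mp hp).subset (hsub a h2))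
          · exact Or.inr h2
      · rw [if_neg hp] at h
        rcases ih _ _ _ h with h1 | h2
        · exact Or.inl (List.mem_cons_of_mem _ h1)
        · simp at h2
          rcases h2 with h2 | h2
          · exact Or.inl (by simp [h2])
          · exact Or.inr h2

theorem go_noop (old new : List Char) (h0 : Char) (ht : List Char) (hold : old = h0 :: ht) :
    ∀ (fuel : Nat) (l acc : List Char), h0 ∉ l →
      PySem.Chars.replace.go old new fuel l acc = acc.reverse ++ l := by
  intro fuel
  induction fuel with
  | zero => intro l acc _; exact go_eq_zero old new l acc
  | succ n ih =>
    intro l acc hn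
    cases l with
    | nil => rw [go_eq_nil]; simp
    | cons c t =>
      rw [go_eq_cons, if_neg (by simp [hold, List.isPrefixOf]; intro hc; exact absurd hc.symm (by simp at hn; tauto))]
      rw [ih t (c :: acc) (by simp at hn; tauto)]
      simp

theorem replace_subset (cs old new : List Char) (hsub : ∀ a ∈ new, a ∈ old) :
    ∀ a ∈ PySem.Chars.replace cs old new, a ∈ cs := by
  intro a h
  unfold PySem.Chars.replace at h
  by_cases he : old.isEmpty
  · rw [if_pos he] at h
    have hnew : new = [] := by
      cases new with
      | nil => rfl
      | cons x xs =>
        have hx := hsub x (by simp)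
        rw [List.isEmpty_iff.mp he] at hx
        simp at hx
    subst hnew
    simpa using h
  · rw [if_neg he] at h
    rcases go_subset old new hsub _ _ _ _ h with h1 | h2
    · exact h1
    · simp at h2

theorem replace_noop (cs old new : List Char) (h0 : Char) (ht : List Char)
    (hold : old = h0 :: ht) (hnm : h0 ∉ cs) : PySem.Chars.replace cs old new = cs := by
  unfold PySem.Chars.replace
  rw [if_neg (by simp [hold])]
  rw [go_noop old new h0 ht hold cs.length cs [] hnm]
  simp

-- on the ASCII domain, the ports' normalisation reduces to the two-replacement char-level form
theorem chars_norm (s : String) (hdom : pvDomStr s = true) :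
    (pvNormalize s).toList
      = PySem.Chars.replace (PySem.Chars.replace s.toList ['$'] []) ['`', 'd', 'o', 't'] ['`'] := by
  have hsub2 : ∀ a ∈ PySem.Chars.replace (PySem.Chars.replace s.toList ['$'] [])
      ['`', 'd', 'o', 't'] ['`'], a ∈ s.toList := by
    intro a ha
    exact replace_subset _ _ _ (by simp) a
      (replace_subset _ _ _ (by intro x hx; simp at hx; simp [hx]) a ha)
  have hni : ∀ c : Char, 126 < c.toNat →
      c ∉ PySem.Chars.replace (PySem.Chars.replace s.toList ['$'] []) ['`', 'd', 'o', 't'] ['`'] := by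
    intro c hc hmem
    have h1 := hsub2 c hmem
    have h2 : pvDomChar c = true := by
      unfold pvDomStr at hdom
      exact List.all_eq_true.mp hdom c h1
    unfold pvDomChar at h2
    simp at h2
    omega
  unfold pvNormalize
  simp only [PySem.Str.toList_replace]
  rw [show ("$" : String).toList = ['$'] from rfl, show ("" : String).toList = [] from rfl,
    show ("`dot" : String).toList = ['`', 'd', 'o', 't'] from rfl,
    show ("`" : String).toList = ['`'] from rfl,
    show ("……" : String).toList = ['…', '…'] from rfl, show ("…" : String).toList = ['…'] from rfl,
    show ("＋" : String).toList = ['＋'] from rfl, show ("+" : String).toList = ['+'] from rfl,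
    show ("－" : String).toList = ['－'] from rfl, show ("-" : String).toList = ['-'] from rfl,
    show ("＝" : String).toList = ['＝'] from rfl, show ("=" : String).toList = ['='] from rfl,
    show ("：" : String).toList = ['：'] from rfl, show (":" : String).toList = [':'] from rfl]
  rw [replace_noop _ _ _ '…' ['…'] rfl (hni '…' (by decide))]
  rw [replace_noop _ _ _ '＋' [] rfl (hni '＋' (by decide))]
  rw [replace_noop _ _ _ '－' [] rfl (hni '－' (by decide))]
  rw [replace_noop _ _ _ '＝' [] rfl (hni '＝' (by decide))]
  rw [replace_noop _ _ _ '：' [] rfl (hni '：' (by decide))]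

-- the two ASCII-relevant replacements in direct style: '$' removal is a filter …
theorem go_dollar (fuel : Nat) : ∀ (l acc : List Char), l.length ≤ fuel →
    PySem.Chars.replace.go ['$'] [] fuel l acc = acc.reverse ++ l.filter (fun c => c != '$') := by
  induction fuel with
  | zero =>
    intro l acc hl
    rw [List.length_eq_zero_iff.mp (Nat.le_zero.mp hl)]
    simp [go_eq_zero]
  | succ n ih =>
    intro l acc hl
    cases l with
    | nil => rw [go_eq_nil]; simp
    | cons c t =>
      rw [go_eq_cons]
      simp only [List.length_cons, Nat.add_le_add_iff_right] at hl
      by_cases hc : c = '$'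
      · rw [if_pos (by simp [List.isPrefixOf, hc])]
        rw [show List.drop ['$'].length (c :: t) = t by simp]
        simp only [List.reverse_nil, List.nil_append]
        rw [ih t acc hl]
        simp [hc]
      · rw [if_neg (by simp [List.isPrefixOf]; intro h; exact absurd h.symm hc)]
        rw [ih t (c :: acc) hl]
        simp [hc]

theorem replace_dollar (l : List Char) :
    PySem.Chars.replace l ['$'] [] = l.filter (fun c => c != '$') := by
  unfold PySem.Chars.replace
  rw [if_neg (by simp)]
  rw [go_dollar l.length l [] le_rfl]
  simp

-- … and '`dot' → '`' is pvNorm2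
theorem go_dot (fuel : Nat) : ∀ (l acc : List Char), l.length ≤ fuel →
    PySem.Chars.replace.go ['`', 'd', 'o', 't'] ['`'] fuel l acc = acc.reverse ++ pvNorm2 l := by
  induction fuel with
  | zero =>
    intro l acc hl
    rw [List.length_eq_zero_iff.mp (Nat.le_zero.mp hl)]
    simp [go_eq_zero, pvNorm2]
  | succ n ih =>
    intro l acc hl
    cases l with
    | nil => rw [go_eq_nil]; simp [pvNorm2]
    | cons c t =>
      rw [go_eq_cons]
      simp only [List.length_cons, Nat.add_le_add_iff_right] at hl
      by_cases hp : ['`', 'd', 'o', 't'].isPrefixOf (c :: t)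
      · obtain ⟨rest, hrest⟩ := List.isPrefixOf_iff_prefix.mp hp
        rw [if_pos hp]
        obtain ⟨hc, ht⟩ : c = '`' ∧ t = 'd' :: 'o' :: 't' :: rest := by
          have h := hrest.symm
          simp only [List.cons_append, List.nil_append, List.cons.injEq] at h
          tauto
        subst hc; subst ht
        rw [show List.drop (['`', 'd', 'o', 't'] : List Char).length
            ('`' :: 'd' :: 'o' :: 't' :: rest) = rest by simp]
        have hr : rest.length ≤ n := by
          simp only [List.length_cons] at hl; omega
        rw [ih rest (['`'].reverse ++ acc) hr]
        simp [pvNorm2]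
      · rw [if_neg hp]
        rw [ih t (c :: acc) hl]
        have hn : pvNorm2 (c :: t) = c :: pvNorm2 t := by
          rw [pvNorm2.eq_def]
          split
          · simp_all
          · rename_i h; simp [List.isPrefixOf] at hp; simp_all
          · simp_all
        rw [hn]
        simp

theorem replace_dot (l : List Char) :
    PySem.Chars.replace l ['`', 'd', 'o', 't'] ['`'] = pvNorm2 l := by
  unfold PySem.Chars.replace
  rw [if_neg (by simp)]
  rw [go_dot l.length l [] le_rfl]
  simp

-- the last-match fold below is Dict.ofList's lookup
theorem update_get? (k : String) (K : List Char) (hk : k.toList = K)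
    (cm : List (String × Int)) : ∀ (d : PySem.Dict String Int),
    (d.update cm).get? k
      = cm.foldl (fun r p => if p.1.toList == K then some p.2 else r) (d.get? k) := by
  induction cm with
  | nil => intro d; rfl
  | cons p rest ih =>
    intro d
    rw [show d.update (p :: rest) = (d.insert p.1 p.2).update rest from rfl]
    rw [ih (d.insert p.1 p.2), List.foldl_cons]
    congr 1
    rw [PySem.Dict.get?_insert]
    by_cases h : k = p.1
    · rw [if_pos h, if_pos (by simp [← hk, h])]
    · rw [if_neg h, if_neg (by
        simp only [beq_iff_eq]
        exact fun hh => h (String.toList_inj.mp (by rw [hk, ← hh])).symm)]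

theorem foldl_find? (P : String × Int → Bool) : ∀ (cm : List (String × Int)) (r : Option Int),
    cm.foldl (fun r p => if P p then some p.2 else r) r
      = match cm.reverse.find? P with | some q => some q.2 | none => r := by
  intro cm
  induction cm with
  | nil => intro r; rfl
  | cons p rest ih =>
    intro r
    rw [List.foldl_cons, ih]
    rw [List.reverse_cons, List.find?_append]
    cases h : rest.reverse.find? P
    · by_cases hp : P p <;> simp [List.find?, hp]
    · simp

theorem lookup_char (cm : List (String × Int)) (c : Char) :
    (cm.reverse.find? (fun p => p.1.toList == [c])).map (fun p => p.2)
      = (PySem.Dict.ofList cm).get? (String.mk [c]) := by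
  rw [show PySem.Dict.ofList cm = (PySem.Dict.empty : PySem.Dict String Int).update cm from rfl]
  rw [update_get? (String.mk [c]) [c] (Eq.symm (String.ofList_eq.mp rfl)) cm PySem.Dict.empty]
  rw [show (PySem.Dict.empty : PySem.Dict String Int).get? (String.mk [c]) = none from rfl]
  rw [foldl_find? (fun p => p.1.toList == [c]) cm none]
  cases h : cm.reverse.find? (fun p => p.1.toList == [c]) <;> simp

-- the char-level list Pre_ filters equals the normalised string, on the domain
theorem pvCodes_norm (s : String) (code_map : List (String × Int)) (hs : pvDomStr s = true) :
    pvCodes s code_map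
      = (pvNorm2 (s.toList.filter (fun c => c != '$'))).filterMap
          (fun c => (PySem.Dict.ofList code_map).get? (String.mk [c])) := by
  unfold pvCodes
  rw [chars_norm s hs, replace_dollar, replace_dot]

theorem pvNorm2_sublist : ∀ (l : List Char), List.Sublist (pvNorm2 l) l := by
  intro l
  induction l using pvNorm2.induct with
  | case1 => simp [pvNorm2]
  | case2 t ih =>
    rw [show pvNorm2 ('`' :: 'd' :: 'o' :: 't' :: t) = '`' :: pvNorm2 t from rfl]
    exact List.Sublist.cons₂ _ (ih.trans ((t.sublist_cons_self 't').trans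
      ((('t' :: t).sublist_cons_self 'o').trans (('o' :: 't' :: t).sublist_cons_self 'd'))))
  | case3 c t h ih =>
    have hn : pvNorm2 (c :: t) = c :: pvNorm2 t := by
      rw [pvNorm2.eq_def]
      split
      · simp_all
      · rename_i hh; simp_all
      · simp_all
    rw [hn]
    exact List.Sublist.cons₂ _ ih

theorem length_filterMap_eq (f : Char → Option Int) : ∀ (M : List Char),
    (M.filterMap f).length = (M.filter (fun c => (f c).isSome)).length := by
  intro M
  induction M with
  | nil => rfl
  | cons c t ih => cases h : f c <;> simp [List.filterMap_cons, List.filter_cons, h, ih]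

theorem mapped_iff (cm : List (String × Int)) (c : Char) :
    ((PySem.Dict.ofList cm).get? (String.mk [c])).isSome
      = cm.any (fun p => p.1.toList == [c]) := by
  rw [← lookup_char]
  rw [Bool.eq_iff_iff]
  simp [List.find?_isSome]

theorem pvVecLoop_eq (d : PySem.Dict String Int) (cs : List Char) (acc : List Int) :
    pvVecLoop d cs acc = acc ++ cs.filterMap (fun c => d.get? (String.mk [c])) := by
  induction cs generalizing acc with
  | nil => simp [pvVecLoop]
  | cons c cs ih =>
    simp only [pvVecLoop, List.filterMap_cons]
    cases d.get? (String.mk [c]) with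
    | none => simp [ih]
    | some n => simp [ih]

theorem pvAttLoop_clean (L : List Int) (h : (-1 : Int) ∉ L) (acc rest : List Int) :
    pvAttLoop acc (L ++ (-1) :: rest) = acc ++ L.map (· + 3) := by
  induction L generalizing acc with
  | nil => simp [pvAttLoop]
  | cons v L ih =>
    have hv : v ≠ -1 := by intro hv; exact h (by simp [hv])
    simp only [List.cons_append, pvAttLoop, if_pos hv]
    rw [ih (by intro hm; exact h (by simp [hm]))]
    simp

theorem filterMap_map_add3 (l : List Char) (f : Char → Option Int) :
    (l.filterMap f).map (· + 3) = l.filterMap (fun c => (f c).map (· + 3)) := by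
  induction l with
  | nil => simp
  | cons c cs ih => cases h : f c <;> simp [h, ih]

-- ===== VERDICT (by name: the statement is the Claim_ definition above) =====
set_option maxHeartbeats 1000000 in
theorem code2attvec_spec : Claim_equal_code2attvec := by
  intro s cm hdom hpre
  obtain ⟨hpre1, hpre2⟩ := hpre
  have hs : pvDomStr s = true := by
    unfold Dom_code2attvec at hdom
    simp only [Bool.and_eq_true] at hdom
    exact hdom.1
  have hnorm := pvCodes_norm s cm hs
  have hmem : (-1 : Int) ∉ pvCodes s cm := by
    intro hm
    rw [hnorm] at hm
    obtain ⟨c, hcmem, hcv⟩ := List.mem_filterMap.mp hm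
    have hcN := (pvNorm2_sublist _).subset hcmem
    have hcs : c ∈ s.toList := List.mem_of_mem_filter hcN
    have hcd : c ≠ '$' := by simpa using List.of_mem_filter hcN
    have h := List.all_eq_true.mp hpre2 c hcs
    rw [Bool.or_eq_true] at h
    rcases h with h | h
    · exact hcd (by simpa using h)
    · have hfind : (cm.reverse.find? (fun p => p.1.toList == [c])).map (fun p => p.2)
          = some (-1) := by
        rw [lookup_char]; exact hcv
      simp [hfind] at h
  have hlen : (pvCodes s cm).length < 48 := by
    rw [hnorm, length_filterMap_eq]
    rw [List.filter_congr (fun c _ => mapped_iff cm c)]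
    omega
  show code2attvec s cm = code2attvec_alt s cm
  have hcodes : List.filterMap (fun c => (PySem.Dict.ofList cm).get? (String.mk [c]))
      (pvNormalize s).toList = pvCodes s cm := rfl
  have hvec : code2vec s cm
      = pvCodes s cm ++ (-1) :: List.replicate (49 - (pvCodes s cm).length) (-1 : Int) := by
    unfold code2vec
    simp only [pvVecLoop_eq, List.nil_append, hcodes]
    rw [if_neg (by omega)]
    have h50 : 50 - (pvCodes s cm).length = (49 - (pvCodes s cm).length) + 1 := by omega
    rw [h50, List.replicate_succ]
  simp only [code2attvec, code2attvec_alt]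
  rw [hvec, pvAttLoop_clean _ hmem]
  simp only [← filterMap_map_add3, hcodes]
  rw [if_neg (by simp; omega)]
  simp
  exact hlen
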